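-- pv_equiv track=rewrite | github.com/christofflueck/adventofcode-2025 | day07.py | part_a
-- ===== SOURCE A (Python) =====
-- def parse_data(data: str):
--     start = None
--     splitters = set()
--
--     rows = data.split('\n')
--     max_x = len(rows[0])
--     max_y = len(rows)
--
--     for y in range(max_y):
--         for x in range(max_x):
--             cell = rows[y][x]
--             match cell:
--                 case 'S':
--                     start = (x, y)
--                 case '^':
--                     splitters.add((x, y))
--
--     return start, splitters, max_x, max_y
--
-- def part_a(data: str) -> int:
--     start, splitters, max_x, max_y = parse_data(data)
--     beams = {start[0]}
--     splits = 0
--     for y in range(0, max_y, 2):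
--         next_beams = set()
--         for x in beams:
--             if (x,y) in splitters:
--                 next_beams.add(x + 1)
--                 next_beams.add(x - 1)
--                 splits += 1
--             else:
--                 next_beams.add(x)
--         beams = next_beams
--
--     return splits
-- ===== SOURCE B (Python) =====
-- def parse_data(data: str):
--     start = None
--     splitters = set()
--
--     rows = data.split('\n')
--     max_x = len(rows[0])
--     max_y = len(rows)
--
--     for y in range(max_y):
--         for x in range(max_x):
--             cell = rows[y][x]
--             match cell:
--                 case 'S':
--                     start = (x, y)
--                 case '^':
--                     splitters.add((x, y))
--
--     return start, splitters, max_x, max_y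
--
-- def part_a(data: str) -> int:
--     start, splitters, max_x, max_y = parse_data(data)
--     splits = 0
--     stack = [(start[0], 0)]
--     visited = set()
--     while stack:
--         x, y = stack.pop()
--         if y >= max_y or (x, y) in visited:
--             continue
--         visited.add((x, y))
--         if (x, y) in splitters:
--             splits += 1
--             stack.append((x + 1, y + 2))
--             stack.append((x - 1, y + 2))
--         else:
--             stack.append((x, y + 2))
--     return splits
-- ===== Notes on version B (the rewrite author's own statement) =====
-- stated objective: alternative
-- what changed: Replaced the row-by-row beam-set simulation (rebuild a whole beam set per grid row) with a worklist stack DFS over (x,y) cells guarded by a visited set, counting each reachable splitter cell once.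
import Mathlib
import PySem

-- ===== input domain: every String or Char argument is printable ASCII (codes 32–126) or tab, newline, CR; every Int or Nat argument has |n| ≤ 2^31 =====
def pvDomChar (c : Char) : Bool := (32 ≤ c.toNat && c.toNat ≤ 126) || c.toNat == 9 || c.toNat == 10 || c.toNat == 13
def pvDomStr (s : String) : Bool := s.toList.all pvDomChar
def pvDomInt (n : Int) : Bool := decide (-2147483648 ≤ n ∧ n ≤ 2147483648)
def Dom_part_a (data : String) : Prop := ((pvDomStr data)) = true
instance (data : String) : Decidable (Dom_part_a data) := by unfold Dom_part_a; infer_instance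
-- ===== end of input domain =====

-- B replaces A's row-by-row beam-set simulation with a worklist stack DFS over (x,y)
-- cells guarded by a visited set (objective: alternative; same return value).


-- ===== PORT A =====
-- shared helper (identical in both Python files): parse the grid
def parse_data (data : String) :
    Option (Int × Int) × PySem.Set (Int × Int) × Int × Int :=
  let rows := (PySem.Str.split? data "\n").getD []
  let maxX : Int := PySem.Str.len (PySem.List.pyGetD rows 0 "")
  let maxY : Int := (rows.length : Int)
  let scan := (PySem.List.pyRange 0 maxY).foldl (fun st y =>
      (PySem.List.pyRange 0 maxX).foldl (fun (st : Option (Int × Int) × PySem.Set (Int × Int)) x =>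
        -- rows[y][x]; the .getD defaults are unreachable under Pre_part_a (Python raises IndexError there)
        let cell := (PySem.Str.pyGet? (PySem.List.pyGetD rows y "") x).getD ' '
        if cell = 'S' then (some (x, y), st.2)
        else if cell = '^' then (st.1, PySem.Set.add st.2 (x, y))
        else st) st)
    ((none : Option (Int × Int)), (PySem.Set.empty : PySem.Set (Int × Int)))
  (scan.1, scan.2, maxX, maxY)

def part_a (data : String) : Int :=
  let p := parse_data data
  match p.1 with
  | none => 0   -- Python raises TypeError here (start is None); excluded by Pre_part_a
  | some start =>
    let spl := p.2.1
    let maxY := p.2.2.2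
    let res := (PySem.List.pyRange 0 maxY 2).foldl
      (fun (st : PySem.Set Int × Int) y =>
        st.1.foldl (fun (acc : PySem.Set Int × Int) x =>
          if (x, y) ∈ spl then
            (PySem.Set.add (PySem.Set.add acc.1 (x + 1)) (x - 1), acc.2 + 1)
          else (PySem.Set.add acc.1 x, acc.2))
          ((PySem.Set.empty : PySem.Set Int), st.2))
      (PySem.Set.add PySem.Set.empty start.1, 0)
    res.2

-- ===== PORT B =====
def bfs_aux (spl : PySem.Set (Int × Int)) (maxY : Int) :
    List (Int × Int) → PySem.Set (Int × Int) → Int → Int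
  | [], _, splits => splits
  | (x, y) :: rest, visited, splits =>
    if maxY ≤ y ∨ (x, y) ∈ visited then bfs_aux spl maxY rest visited splits
    else if (x, y) ∈ spl then
      bfs_aux spl maxY ((x - 1, y + 2) :: (x + 1, y + 2) :: rest)
        (PySem.Set.add visited (x, y)) (splits + 1)
    else
      bfs_aux spl maxY ((x, y + 2) :: rest) (PySem.Set.add visited (x, y)) splits
termination_by st _ _ => (st.map (fun p => 3 ^ (maxY - p.2).toNat)).sum
decreasing_by
  · simp
  all_goals
    simp only [List.map_cons, List.sum_cons]
    have hk : 1 ≤ (maxY - y).toNat := by omega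
    have key : 2 * (3:ℕ) ^ (maxY - (y+2)).toNat < 3 ^ (maxY - y).toNat := by
      calc 2 * (3:ℕ) ^ (maxY - (y+2)).toNat
          ≤ 2 * 3 ^ ((maxY - y).toNat - 1) :=
            Nat.mul_le_mul_left _ (Nat.pow_le_pow_right (by norm_num) (by omega))
        _ < 3 * 3 ^ ((maxY - y).toNat - 1) := by
            have := Nat.pow_pos (n := (maxY - y).toNat - 1) (show 0 < 3 by norm_num)
            omega
        _ = 3 ^ (maxY - y).toNat := by
            rw [← pow_succ']
            congr 1
            omega
    omega

def part_a_alt (data : String) : Int :=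
  let p := parse_data data
  match p.1 with
  | none => 0   -- Python raises TypeError here (start is None); excluded by Pre_part_a
  | some start =>
    bfs_aux p.2.1 p.2.2.2 [(start.1, 0)] PySem.Set.empty 0

-- ===== PRECONDITION & SPEC =====
-- Pre_ excludes exactly the inputs on which Python A raises: a row shorter than the
-- first row (IndexError on rows[y][x]) or no 'S' among the scanned columns
-- (TypeError on start[0] since start stays None).
def Pre_part_a (data : String) : Prop :=
  (∀ row ∈ (PySem.Str.split? data "\n").getD [],
      ((((PySem.Str.split? data "\n").getD []).headD "").toList).length ≤ row.toList.length) ∧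
  (∃ row ∈ (PySem.Str.split? data "\n").getD [],
      'S' ∈ row.toList.take ((((PySem.Str.split? data "\n").getD []).headD "").toList).length)
instance (data : String) : Decidable (Pre_part_a data) := by unfold Pre_part_a; infer_instance

def pvWitness_part_a : String := "S"

def Spec_part_a (data : String) (out : Int) : Prop := out = part_a_alt data
instance (data : String) (out : Int) : Decidable (Spec_part_a data out) := by unfold Spec_part_a; infer_instance

-- ===== CLAIM (what is proved, stated in full; the proofs are below) =====
def Claim_equal_part_a : Prop := ∀ (data : String), Dom_part_a data → Pre_part_a data → Spec_part_a data (part_a data)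

-- ===== LEMMAS AND PROOFS =====
-- RA spl maxY v p: the cells (at rows p.2, p.2+2, …, all < maxY) the beam reaches from
-- cell p while avoiding the set v; the common reference both ports are reduced to.
def RA (spl : PySem.Set (Int × Int)) (maxY : Int) (v : Finset (Int × Int))
    (p : Int × Int) : Finset (Int × Int) :=
  if maxY ≤ p.2 ∨ p ∈ v then ∅
  else if p ∈ spl then
    insert p (RA spl maxY v (p.1 + 1, p.2 + 2) ∪ RA spl maxY v (p.1 - 1, p.2 + 2))
  else insert p (RA spl maxY v (p.1, p.2 + 2))
termination_by (maxY - p.2).toNat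
decreasing_by all_goals omega

lemma RA_blocked {spl maxY v p} (h : maxY ≤ p.2 ∨ p ∈ v) : RA spl maxY v p = ∅ := by
  rw [RA, if_pos h]

lemma RA_mem {spl maxY v p q} (h : q ∈ RA spl maxY v p) :
    p.2 ≤ q.2 ∧ q.2 < maxY ∧ q ∉ v := by
  fun_induction RA spl maxY v p with
  | case1 p hbl => simp at h
  | case2 p hbl hs ih1 ih2 =>
    simp only [Finset.mem_insert, Finset.mem_union] at h
    rcases h with h | h | h
    · subst h; rw [not_or] at hbl; exact ⟨le_refl _, by omega, hbl.2⟩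
    · rcases ih1 h with ⟨h1, h2, h3⟩; exact ⟨by omega, h2, h3⟩
    · rcases ih2 h with ⟨h1, h2, h3⟩; exact ⟨by omega, h2, h3⟩
  | case3 p hbl hs ih =>
    simp only [Finset.mem_insert] at h
    rcases h with h | h
    · subst h; rw [not_or] at hbl; exact ⟨le_refl _, by omega, hbl.2⟩
    · rcases ih h with ⟨h1, h2, h3⟩; exact ⟨by omega, h2, h3⟩

lemma RA_insert_high {spl : PySem.Set (Int × Int)} {maxY : Int} (p : Int × Int)
    (v : Finset (Int × Int)) :
    ∀ (q : Int × Int), p.2 < q.2 → RA spl maxY (insert p v) q = RA spl maxY v q := by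
  suffices H : ∀ (n : ℕ) (q : Int × Int), (maxY - q.2).toNat = n → p.2 < q.2 →
      RA spl maxY (insert p v) q = RA spl maxY v q from fun q hq => H _ q rfl hq
  intro n
  induction n using Nat.strong_induction_on with
  | _ n ih =>
    intro q hn hq
    have hqp : q ≠ p := fun e => by rw [e] at hq; omega
    conv_lhs => rw [RA.eq_def]
    conv_rhs => rw [RA.eq_def]
    simp only [Finset.mem_insert, hqp, false_or]
    split_ifs with h1 h2
    · rfl
    · rw [ih _ (by omega) _ rfl (by omega), ih _ (by omega) _ rfl (by omega)]
    · rw [ih _ (by omega) _ rfl (by omega)]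

lemma RA_anti_insert {spl : PySem.Set (Int × Int)} {maxY : Int} (p : Int × Int)
    (v : Finset (Int × Int)) (q : Int × Int) :
    RA spl maxY (insert p v) q ⊆ RA spl maxY v q := by
  fun_induction RA spl maxY (insert p v) q with
  | case1 q hbl => simp
  | case2 q hbl hs ih1 ih2 =>
    have hq : ¬ (maxY ≤ q.2 ∨ q ∈ v) := by
      simp only [Finset.mem_insert, not_or] at hbl ⊢; tauto
    conv_rhs => rw [RA.eq_def]
    rw [if_neg hq, if_pos hs]
    exact Finset.insert_subset_insert _ (Finset.union_subset_union ih1 ih2)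
  | case3 q hbl hs ih =>
    have hq : ¬ (maxY ≤ q.2 ∨ q ∈ v) := by
      simp only [Finset.mem_insert, not_or] at hbl ⊢; tauto
    conv_rhs => rw [RA.eq_def]
    rw [if_neg hq, if_neg hs]
    exact Finset.insert_subset_insert _ ih

lemma RA_split_insert {spl : PySem.Set (Int × Int)} {maxY : Int} (p : Int × Int)
    (v : Finset (Int × Int)) (q : Int × Int) :
    RA spl maxY v q ⊆ RA spl maxY (insert p v) q ∪ RA spl maxY v p := by
  fun_induction RA spl maxY v q with
  | case1 q hbl => simp
  | case2 q hbl hs ih1 ih2 =>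
    by_cases hqp : q = p
    · subst hqp
      have : RA spl maxY v q = insert q (RA spl maxY v (q.1 + 1, q.2 + 2) ∪ RA spl maxY v (q.1 - 1, q.2 + 2)) := by
        rw [RA.eq_def, if_neg hbl, if_pos hs]
      rw [← this]
      exact Finset.subset_union_right
    · have hq : ¬ (maxY ≤ q.2 ∨ q ∈ insert p v) := by
        simp only [Finset.mem_insert, not_or] at hbl ⊢; tauto
      conv_rhs => rw [RA.eq_def]
      rw [if_neg hq, if_pos hs]
      intro z hz
      simp only [Finset.mem_insert, Finset.mem_union] at hz ⊢
      rcases hz with hz | hz | hz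
      · tauto
      · have := ih1 hz; simp only [Finset.mem_union] at this; tauto
      · have := ih2 hz; simp only [Finset.mem_union] at this; tauto
  | case3 q hbl hs ih =>
    by_cases hqp : q = p
    · subst hqp
      have : RA spl maxY v q = insert q (RA spl maxY v (q.1, q.2 + 2)) := by
        rw [RA.eq_def, if_neg hbl, if_neg hs]
      rw [← this]
      exact Finset.subset_union_right
    · have hq : ¬ (maxY ≤ q.2 ∨ q ∈ insert p v) := by
        simp only [Finset.mem_insert, not_or] at hbl ⊢; tauto
      conv_rhs => rw [RA.eq_def]
      rw [if_neg hq, if_neg hs]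
      intro z hz
      simp only [Finset.mem_insert, Finset.mem_union] at hz ⊢
      rcases hz with hz | hz
      · tauto
      · have := ih hz; simp only [Finset.mem_union] at this; tauto

def RAs (spl : PySem.Set (Int × Int)) (maxY : Int) (v : Finset (Int × Int))
    (st : List (Int × Int)) : Finset (Int × Int) :=
  st.foldr (fun p acc => RA spl maxY v p ∪ acc) ∅

lemma RAs_insert_exchange {spl : PySem.Set (Int × Int)} {maxY : Int} (p : Int × Int)
    (v : Finset (Int × Int)) (st : List (Int × Int)) :
    RAs spl maxY v st ∪ RA spl maxY v p
      = RAs spl maxY (insert p v) st ∪ RA spl maxY v p := by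
  induction st with
  | nil => rfl
  | cons r st' ih =>
    have h1 : ∀ z, z ∈ RA spl maxY (insert p v) r → z ∈ RA spl maxY v r :=
      fun z h => RA_anti_insert p v r h
    have h2 : ∀ z, z ∈ RA spl maxY v r →
        z ∈ RA spl maxY (insert p v) r ∨ z ∈ RA spl maxY v p := by
      intro z h
      have := RA_split_insert p v r h
      simpa using this
    have ih' := Finset.ext_iff.mp ih
    ext z
    have := ih' z
    simp only [RAs, List.foldr_cons, Finset.mem_union] at this ⊢
    constructor
    · rintro ((hz | hz) | hz)
      · rcases h2 z hz with h | h <;> tauto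
      · tauto
      · tauto
    · rintro ((hz | hz) | hz)
      · exact Or.inl (Or.inl (h1 z hz))
      · tauto
      · tauto

lemma toFinset_add (s : PySem.Set (Int × Int)) (x : Int × Int) :
    (PySem.Set.add s x).toFinset = insert x s.toFinset := by
  ext z
  simp [PySem.Set.mem_add, or_comm]

lemma RAs_not_mem_v {spl : PySem.Set (Int × Int)} {maxY : Int} {v : Finset (Int × Int)}
    {st : List (Int × Int)} {z : Int × Int} (h : z ∈ RAs spl maxY v st) : z ∉ v := by
  induction st with
  | nil => simp [RAs] at h
  | cons r st' ih =>
    simp only [RAs, List.foldr_cons, Finset.mem_union] at h ih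
    rcases h with h | h
    · exact (RA_mem h).2.2
    · exact ih h

lemma bfs_aux_eq (spl : PySem.Set (Int × Int)) (maxY : Int)
    (st : List (Int × Int)) (v : PySem.Set (Int × Int)) (c : Int) :
    bfs_aux spl maxY st v c
      = c + ((RAs spl maxY v.toFinset st).filter (· ∈ spl)).card := by
  fun_induction bfs_aux spl maxY st v c with
  | case1 v c => simp [RAs]
  | case2 x y rest v c h ih =>
    have hbl : RA spl maxY v.toFinset (x, y) = ∅ := by
      apply RA_blocked
      simpa using h
    rw [ih]
    simp [RAs, hbl]
  | case3 x y rest v c h hs ih =>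
    rw [ih, toFinset_add]
    have hub : ¬ (maxY ≤ ((x:Int), (y:Int)).2 ∨ ((x:Int), (y:Int)) ∈ v.toFinset) := by
      simpa using h
    -- unfold RA at the head cell
    have hra : RA spl maxY v.toFinset (x, y)
        = insert (x, y) (RA spl maxY v.toFinset (x + 1, y + 2) ∪ RA spl maxY v.toFinset (x - 1, y + 2)) := by
      rw [RA.eq_def, if_neg hub, if_pos hs]
    have hkey : RAs spl maxY v.toFinset ((x, y) :: rest)
        = insert (x, y) (RAs spl maxY (insert (x, y) v.toFinset) ((x - 1, y + 2) :: (x + 1, y + 2) :: rest)) := by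
      have e1 : RAs spl maxY v.toFinset ((x, y) :: rest)
          = RAs spl maxY v.toFinset rest ∪ RA spl maxY v.toFinset (x, y) := by
        simp [RAs, Finset.union_comm]
      rw [e1, RAs_insert_exchange, hra,
        ← RA_insert_high (x, y) v.toFinset (x + 1, y + 2) (by simp),
        ← RA_insert_high (x, y) v.toFinset (x - 1, y + 2) (by simp)]
      ext z
      simp only [RAs, List.foldr_cons, Finset.mem_union, Finset.mem_insert]
      tauto
    rw [hkey, Finset.filter_insert, if_pos hs, Finset.card_insert_of_notMem]
    · push_cast; ring
    · intro hmem
      exact RAs_not_mem_v (Finset.mem_of_mem_filter _ hmem) (Finset.mem_insert_self _ _)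
  | case4 x y rest v c h hs ih =>
    rw [ih, toFinset_add]
    have hub : ¬ (maxY ≤ ((x:Int), (y:Int)).2 ∨ ((x:Int), (y:Int)) ∈ v.toFinset) := by
      simpa using h
    have hra : RA spl maxY v.toFinset (x, y)
        = insert (x, y) (RA spl maxY v.toFinset (x, y + 2)) := by
      rw [RA.eq_def, if_neg hub, if_neg hs]
    have hkey : RAs spl maxY v.toFinset ((x, y) :: rest)
        = insert (x, y) (RAs spl maxY (insert (x, y) v.toFinset) ((x, y + 2) :: rest)) := by
      have e1 : RAs spl maxY v.toFinset ((x, y) :: rest)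
          = RAs spl maxY v.toFinset rest ∪ RA spl maxY v.toFinset (x, y) := by
        simp [RAs, Finset.union_comm]
      rw [e1, RAs_insert_exchange, hra,
        ← RA_insert_high (x, y) v.toFinset (x, y + 2) (by simp)]
      ext z
      simp only [RAs, List.foldr_cons, Finset.mem_union, Finset.mem_insert]
      tauto
    rw [hkey, Finset.filter_insert, if_neg hs]

lemma pyRange_two_nil {y b : Int} (h : b ≤ y) : PySem.List.pyRange y b 2 = [] := by
  rw [PySem.List.pyRange_of_pos _ _ (by norm_num)]
  simp
  omega

lemma pyRange_two_cons {y b : Int} (h : y < b) :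
    PySem.List.pyRange y b 2 = y :: PySem.List.pyRange (y + 2) b 2 := by
  rw [PySem.List.pyRange_of_pos _ _ (by norm_num), PySem.List.pyRange_of_pos _ _ (by norm_num)]
  have hn : ((b - y + 2 - 1) / 2).toNat = ((b - (y + 2) + 2 - 1) / 2).toNat + 1 := by omega
  simp only [if_pos h]
  split
  · rw [hn, List.range_succ_eq_map]
    simp [List.map_map, Function.comp]
    intro a _
    ring
  · have h1 : ((b - y + 2 - 1) / 2).toNat = 1 := by omega
    rw [h1]
    simp

def childList (spl : PySem.Set (Int × Int)) (y : Int) (x : Int) : List Int :=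
  if (x, y) ∈ spl then [x + 1, x - 1] else [x]

def levelSet (spl : PySem.Set (Int × Int)) (maxY : Int) (B : Finset Int) (y : Int) :
    Finset (Int × Int) :=
  B.biUnion (fun x => RA spl maxY ∅ (x, y))

-- the inner loop of A over one row
lemma inner_snd (spl : PySem.Set (Int × Int)) (y : Int) (B : List Int)
    (nb : PySem.Set Int) (s : Int) :
    (B.foldl (fun (acc : PySem.Set Int × Int) x =>
        if (x, y) ∈ spl then
          (PySem.Set.add (PySem.Set.add acc.1 (x + 1)) (x - 1), acc.2 + 1)
        else (PySem.Set.add acc.1 x, acc.2)) (nb, s)).2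
      = s + (B.countP (fun x => decide ((x, y) ∈ spl)) : Int) := by
  induction B generalizing nb s with
  | nil => simp
  | cons x B ih =>
    simp only [List.foldl_cons, List.countP_cons]
    by_cases h : (x, y) ∈ spl
    · simp only [ih, h, decide_true]
      push_cast
      ring
    · simp [h, ih]

lemma inner_fst_mem (spl : PySem.Set (Int × Int)) (y : Int) (B : List Int)
    (nb : PySem.Set Int) (s : Int) (z : Int) :
    z ∈ (B.foldl (fun (acc : PySem.Set Int × Int) x =>
        if (x, y) ∈ spl then
          (PySem.Set.add (PySem.Set.add acc.1 (x + 1)) (x - 1), acc.2 + 1)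
        else (PySem.Set.add acc.1 x, acc.2)) (nb, s)).1
      ↔ z ∈ nb ∨ ∃ x ∈ B, z ∈ childList spl y x := by
  induction B generalizing nb s with
  | nil => simp
  | cons x B ih =>
    simp only [List.foldl_cons]
    split_ifs with h
    · rw [ih]
      simp [PySem.Set.mem_add, childList, h]
      tauto
    · rw [ih]
      simp [PySem.Set.mem_add, childList, h]
      tauto

lemma inner_fst_nodup (spl : PySem.Set (Int × Int)) (y : Int) (B : List Int)
    (nb : PySem.Set Int) (s : Int) (hnb : nb.Nodup) :
    (B.foldl (fun (acc : PySem.Set Int × Int) x =>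
        if (x, y) ∈ spl then
          (PySem.Set.add (PySem.Set.add acc.1 (x + 1)) (x - 1), acc.2 + 1)
        else (PySem.Set.add acc.1 x, acc.2)) (nb, s)).1.Nodup := by
  induction B generalizing nb s with
  | nil => exact hnb
  | cons x B ih =>
    simp only [List.foldl_cons]
    split_ifs with h
    · exact ih _ _ (PySem.Set.nodup_add _ _ (PySem.Set.nodup_add _ _ hnb))
    · exact ih _ _ (PySem.Set.nodup_add _ _ hnb)

lemma levelSet_empty {spl : PySem.Set (Int × Int)} {maxY : Int} (B : Finset Int) {y : Int}
    (h : maxY ≤ y) : levelSet spl maxY B y = ∅ := by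
  have hz : ∀ x : Int, RA spl maxY ∅ (x, y) = ∅ := fun x => RA_blocked (Or.inl h)
  ext z
  simp [levelSet, hz]

lemma levelSet_step {spl : PySem.Set (Int × Int)} {maxY : Int} (B : Finset Int) {y : Int}
    (hy : y < maxY) :
    levelSet spl maxY B y
      = B.image (fun x => (x, y)) ∪
        levelSet spl maxY (B.biUnion (fun x => (childList spl y x).toFinset)) (y + 2) := by
  ext z
  simp only [levelSet, Finset.mem_biUnion, Finset.mem_union, Finset.mem_image,
    List.mem_toFinset]
  constructor
  · rintro ⟨x, hx, hz⟩
    rw [RA.eq_def] at hz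
    rw [if_neg (by simp; omega)] at hz
    by_cases hs : ((x:Int), (y:Int)) ∈ spl
    · rw [if_pos hs] at hz
      simp only [Finset.mem_insert, Finset.mem_union] at hz
      rcases hz with hz | hz | hz
      · exact Or.inl ⟨x, hx, hz.symm⟩
      · exact Or.inr ⟨x + 1, ⟨x, hx, by simp [childList, hs]⟩, hz⟩
      · exact Or.inr ⟨x - 1, ⟨x, hx, by simp [childList, hs]⟩, hz⟩
    · rw [if_neg hs] at hz
      simp only [Finset.mem_insert] at hz
      rcases hz with hz | hz
      · exact Or.inl ⟨x, hx, hz.symm⟩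
      · exact Or.inr ⟨x, ⟨x, hx, by simp [childList, hs]⟩, hz⟩
  · rintro (⟨x, hx, hz⟩ | ⟨x', ⟨x, hx, hc⟩, hz⟩)
    · refine ⟨x, hx, ?_⟩
      rw [RA.eq_def, if_neg (by simp; omega)]
      split <;> simp [← hz]
    · refine ⟨x, hx, ?_⟩
      rw [RA.eq_def, if_neg (by simp; omega)]
      by_cases hs : ((x:Int), (y:Int)) ∈ spl
      · rw [if_pos hs]
        simp only [childList, if_pos hs, List.mem_cons, List.not_mem_nil, or_false] at hc
        simp only [Finset.mem_insert, Finset.mem_union]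
        rcases hc with hc | hc <;> subst hc
        · exact Or.inr (Or.inl hz)
        · exact Or.inr (Or.inr hz)
      · rw [if_neg hs]
        simp only [childList, if_neg hs, List.mem_cons, List.not_mem_nil, or_false] at hc
        subst hc
        simp only [Finset.mem_insert]
        exact Or.inr hz

lemma card_level_step {spl : PySem.Set (Int × Int)} {maxY : Int} (B : Finset Int) {y : Int}
    (hy : y < maxY) :
    (((levelSet spl maxY B y)).filter (· ∈ spl)).card
      = (B.filter (fun x => (x, y) ∈ spl)).card
        + (((levelSet spl maxY (B.biUnion (fun x => (childList spl y x).toFinset)) (y + 2))).filter (· ∈ spl)).card := by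
  rw [levelSet_step B hy, Finset.filter_union]
  rw [Finset.card_union_of_disjoint]
  · congr 1
    rw [Finset.filter_image]
    rw [Finset.card_image_of_injective _ (fun a b h => by simpa using congrArg Prod.fst h)]
  · rw [Finset.disjoint_left]
    intro z hz1 hz2
    have h1 := Finset.mem_of_mem_filter _ hz1
    have h2 := Finset.mem_of_mem_filter _ hz2
    simp only [Finset.mem_image] at h1
    rcases h1 with ⟨x, _, rfl⟩
    simp only [levelSet, Finset.mem_biUnion] at h2
    rcases h2 with ⟨x', _, h2⟩
    have := (RA_mem h2).1
    simp at this

lemma countP_toFinset_card (B : List Int) (hB : B.Nodup) (p : Int → Prop) [DecidablePred p] :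
    (B.toFinset.filter p).card = B.countP (fun x => decide (p x)) := by
  have h1 : (B.filter (fun x => decide (p x))).toFinset = B.toFinset.filter p := by
    rw [List.toFinset_filter]
    simp
  rw [← h1, List.toFinset_card_of_nodup (hB.filter _), List.countP_eq_length_filter]

lemma a_loop_eq (spl : PySem.Set (Int × Int)) (maxY : Int) (y : Int)
    (B : PySem.Set Int) (hB : B.Nodup) (s : Int) :
    ((PySem.List.pyRange y maxY 2).foldl
      (fun (st : PySem.Set Int × Int) y =>
        st.1.foldl (fun (acc : PySem.Set Int × Int) x =>
          if (x, y) ∈ spl then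
            (PySem.Set.add (PySem.Set.add acc.1 (x + 1)) (x - 1), acc.2 + 1)
          else (PySem.Set.add acc.1 x, acc.2))
          ((PySem.Set.empty : PySem.Set Int), st.2))
      (B, s)).2
      = s + (((levelSet spl maxY B.toFinset y)).filter (· ∈ spl)).card := by
  suffices H : ∀ (n : ℕ) (y : Int) (B : PySem.Set Int) (s : Int), (maxY - y).toNat = n →
      B.Nodup →
      ((PySem.List.pyRange y maxY 2).foldl
        (fun (st : PySem.Set Int × Int) y =>
          st.1.foldl (fun (acc : PySem.Set Int × Int) x =>
            if (x, y) ∈ spl then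
              (PySem.Set.add (PySem.Set.add acc.1 (x + 1)) (x - 1), acc.2 + 1)
            else (PySem.Set.add acc.1 x, acc.2))
            ((PySem.Set.empty : PySem.Set Int), st.2))
        (B, s)).2
        = s + (((levelSet spl maxY B.toFinset y)).filter (· ∈ spl)).card from
    H _ y B s rfl hB
  intro n
  induction n using Nat.strong_induction_on with
  | _ n ih =>
    intro y B s hn hB
    by_cases hy : maxY ≤ y
    · rw [pyRange_two_nil hy, levelSet_empty _ hy]
      simp
    · rw [pyRange_two_cons (by omega), List.foldl_cons]
      have hpair : (B.foldl (fun (acc : PySem.Set Int × Int) x =>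
            if (x, y) ∈ spl then
              (PySem.Set.add (PySem.Set.add acc.1 (x + 1)) (x - 1), acc.2 + 1)
            else (PySem.Set.add acc.1 x, acc.2))
            ((PySem.Set.empty : PySem.Set Int), s))
          = ((B.foldl (fun (acc : PySem.Set Int × Int) x =>
            if (x, y) ∈ spl then
              (PySem.Set.add (PySem.Set.add acc.1 (x + 1)) (x - 1), acc.2 + 1)
            else (PySem.Set.add acc.1 x, acc.2))
            ((PySem.Set.empty : PySem.Set Int), s)).1,
            (B.foldl (fun (acc : PySem.Set Int × Int) x =>
            if (x, y) ∈ spl then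
              (PySem.Set.add (PySem.Set.add acc.1 (x + 1)) (x - 1), acc.2 + 1)
            else (PySem.Set.add acc.1 x, acc.2))
            ((PySem.Set.empty : PySem.Set Int), s)).2) := rfl
      simp only []
      rw [hpair, ih ((maxY - (y + 2)).toNat) (by omega) (y + 2) _ _ rfl (inner_fst_nodup spl y B _ s (by simp [PySem.Set.empty]))]
      rw [inner_snd]
      have hTF : ((B.foldl (fun (acc : PySem.Set Int × Int) x =>
            if (x, y) ∈ spl then
              (PySem.Set.add (PySem.Set.add acc.1 (x + 1)) (x - 1), acc.2 + 1)
            else (PySem.Set.add acc.1 x, acc.2))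
            ((PySem.Set.empty : PySem.Set Int), s)).1).toFinset
          = B.toFinset.biUnion (fun x => (childList spl y x).toFinset) := by
        ext z
        rw [List.mem_toFinset, inner_fst_mem]
        simp [PySem.Set.empty]
      rw [hTF]
      conv_rhs => rw [card_level_step _ (show y < maxY by omega)]
      rw [← countP_toFinset_card B hB (fun x => (x, y) ∈ spl)]
      push_cast
      ring

-- ===== VERDICT (by name: the statement is the Claim_ definition above) =====
theorem part_a_spec : Claim_equal_part_a := by
  intro data _ _
  unfold Spec_part_a part_a part_a_alt
  cases h : (parse_data data).1 with
  | none => simp [h]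
  | some start =>
    simp only [h]
    rw [a_loop_eq _ _ _ _ (by simp [PySem.Set.add]) 0, bfs_aux_eq]
    congr 1
    congr 1
    have h1 : (PySem.Set.add (PySem.Set.empty : PySem.Set Int) start.1).toFinset = {start.1} := by
      simp [PySem.Set.add, PySem.Set.empty]
    have h2 : ((PySem.Set.empty : PySem.Set (Int × Int))).toFinset = (∅ : Finset (Int × Int)) := by
      simp [PySem.Set.empty]
    rw [h1, h2]
    simp [levelSet, RAs, Finset.singleton_biUnion]
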